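-- pv_equiv track=rewrite | github.com/amilashanaka/sdc | pynq/daq.py | _is_supported_factor
-- ===== SOURCE A (Python) =====
-- def _is_supported_factor(factor):
--     """Validate factor: must be of form 2^a * 5^b with a,b >= 0"""
--     if not isinstance(factor, int) or factor < 1:
--         return False
--     temp = factor
--     while temp % 2 == 0:
--         temp //= 2
--     while temp % 5 == 0:
--         temp //= 5
--     return temp == 1
-- ===== SOURCE B (Python) =====
-- def _is_supported_factor(factor):
--     """Validate factor: must be of form 2^a * 5^b with a,b >= 0"""
--     if not isinstance(factor, int) or factor < 1:
--         return False
--     # n is of the form 2^a*5^b iff n divides a sufficiently large power of 10;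
--     # bit_length() exceeds both possible exponents, so one modulo suffices.
--     return 10 ** factor.bit_length() % factor == 0
-- ===== Notes on version B (the rewrite author's own statement) =====
-- stated objective: idiomatic
-- what changed: Replaced the two factor-stripping while-loops by a single divisibility test: factor is 2^a*5^b iff it divides 10^(factor.bit_length()), so one power and one modulo replace all the loop divisions.
import Mathlib
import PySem

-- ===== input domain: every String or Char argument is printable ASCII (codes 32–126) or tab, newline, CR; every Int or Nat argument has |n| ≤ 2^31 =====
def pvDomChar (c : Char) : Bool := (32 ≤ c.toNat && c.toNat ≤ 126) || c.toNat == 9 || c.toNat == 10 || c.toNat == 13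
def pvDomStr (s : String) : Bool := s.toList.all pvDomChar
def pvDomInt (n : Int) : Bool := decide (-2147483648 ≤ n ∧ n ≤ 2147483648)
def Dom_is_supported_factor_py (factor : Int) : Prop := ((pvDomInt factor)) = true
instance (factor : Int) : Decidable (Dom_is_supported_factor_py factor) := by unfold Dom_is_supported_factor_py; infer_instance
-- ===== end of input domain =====

-- B replaces A's two factor-stripping while-loops by a single divisibility test against 10^bit_length (idiomatic; same return value).

-- ===== PORT A =====
-- 'while temp % p == 0: temp //= p', instantiated at p = 2 and p = 5 below; the
-- '2 ≤ p ∧ 1 ≤ temp' part of the guard is a totality guard only: it holds on every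
-- state the ported Python reaches (factor ≥ 1 after the first branch).
def pvStripLoop (p temp : Int) : Int :=
  if h : 2 ≤ p ∧ 1 ≤ temp ∧ PySem.Int.mod temp p = 0 then
    pvStripLoop p (PySem.Int.floordiv temp p)
  else temp
termination_by temp.toNat
decreasing_by
  obtain ⟨hp, ht, hm⟩ := h
  rw [PySem.Int.floordiv_eq_ediv_of_pos (by omega)]
  have hdvd : p ∣ temp := (PySem.Int.mod_eq_zero_iff_dvd temp p).mp hm
  have h1 : temp / p < temp :=
    (Int.ediv_lt_iff_of_dvd_of_pos (by omega) hdvd).mpr (by nlinarith)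
  omega


def is_supported_factor_py (factor : Int) : Bool :=
  if factor < 1 then false
  else decide (pvStripLoop 5 (pvStripLoop 2 factor) = 1)

-- ===== PORT B =====
def is_supported_factor_py_alt (factor : Int) : Bool :=
  if factor < 1 then false
  else decide (PySem.Int.mod (10 ^ PySem.Int.bitLength factor) factor = 0)

-- ===== PRECONDITION & SPEC =====
def Spec_is_supported_factor_py (factor : Int) (out : Bool) : Prop := out = is_supported_factor_py_alt factor
instance (factor : Int) (out : Bool) : Decidable (Spec_is_supported_factor_py factor out) := by unfold Spec_is_supported_factor_py; infer_instance

-- ===== CLAIM (what is proved, stated in full; the proofs are below) =====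
def Claim_equal_is_supported_factor_py : Prop := ∀ (factor : Int), Dom_is_supported_factor_py factor → Spec_is_supported_factor_py factor (is_supported_factor_py factor)

-- ===== LEMMAS AND PROOFS =====

/-- Invariant of the stripping loop: the result is positive, not divisible by `p`,
    and `temp = p^a * result` for some exponent `a`. -/
lemma pvStripLoop_spec (p : Int) (hp : 2 ≤ p) :
    ∀ N (temp : Int), temp.toNat ≤ N → 1 ≤ temp →
      1 ≤ pvStripLoop p temp ∧ ¬ p ∣ pvStripLoop p temp ∧
        ∃ a : ℕ, temp = p ^ a * pvStripLoop p temp := by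
  intro N
  induction N with
  | zero => intro temp h0 h1; omega
  | succ n ih =>
    intro temp hle ht
    rw [pvStripLoop]
    by_cases hm : PySem.Int.mod temp p = 0
    · have hdvd : p ∣ temp := (PySem.Int.mod_eq_zero_iff_dvd temp p).mp hm
      simp only [hp, ht, hm, and_self, dite_true]
      have hfd : PySem.Int.floordiv temp p = temp / p :=
        PySem.Int.floordiv_eq_ediv_of_pos (by omega)
      have hple : p ≤ temp := Int.le_of_dvd (by omega) hdvd
      have h1 : 1 ≤ temp / p :=
        (Int.le_ediv_iff_of_dvd_of_pos (by omega) hdvd).mpr (by omega)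
      have h2 : temp / p < temp :=
        (Int.ediv_lt_iff_of_dvd_of_pos (by omega) hdvd).mpr (by nlinarith)
      obtain ⟨ha, hb, a, hc⟩ := ih (temp / p) (by omega) h1
      rw [hfd]
      refine ⟨ha, hb, a + 1, ?_⟩
      calc temp = p * (temp / p) := (Int.mul_ediv_cancel' hdvd).symm
        _ = p * (p ^ a * pvStripLoop p (temp / p)) := by rw [← hc]
        _ = p ^ (a + 1) * pvStripLoop p (temp / p) := by ring
    · simp only [hm, and_false, dite_false]
      exact ⟨ht, fun hdvd => hm ((PySem.Int.mod_eq_zero_iff_dvd temp p).mpr hdvd),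
             0, by ring⟩

/-- Characterisation of A's loop result: it equals 1 iff `factor` divides
    `10 ^ bitLength factor` — the fact B rests on. -/
lemma pvStrip_eq_one_iff (factor : Int) (hf : 1 ≤ factor) :
    pvStripLoop 5 (pvStripLoop 2 factor) = 1 ↔
      factor ∣ 10 ^ PySem.Int.bitLength factor := by
  obtain ⟨hm1, hm2, a, hma⟩ :=
    pvStripLoop_spec 2 (by norm_num) factor.toNat factor le_rfl hf
  set m := pvStripLoop 2 factor with hm
  obtain ⟨hr1, hr5, b, hrb⟩ :=
    pvStripLoop_spec 5 (by norm_num) m.toNat m le_rfl hm1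
  set r := pvStripLoop 5 m with hr
  set k := PySem.Int.bitLength factor with hk
  have hcastf : ((factor.toNat : Int)) = factor := by omega
  have hnk : factor.toNat < 2 ^ k := by
    have := PySem.Int.lt_two_pow_bitLength factor
    rwa [show factor.natAbs = factor.toNat by omega] at this
  constructor
  · intro h1
    rw [h1, mul_one] at hrb
    have hfacZ : factor = 2 ^ a * 5 ^ b := by rw [hma, hrb]
    have hfacN : factor.toNat = 2 ^ a * 5 ^ b := by
      have : ((factor.toNat : Int)) = ((2 ^ a * 5 ^ b : ℕ) : Int) := by
        rw [hcastf, hfacZ]; push_cast; ring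
      exact_mod_cast this
    have hpos : 0 < factor.toNat := by omega
    have ha : a < k := by
      have h2a : 2 ^ a ≤ factor.toNat := Nat.le_of_dvd hpos ⟨5 ^ b, hfacN⟩
      exact (Nat.pow_lt_pow_iff_right (by norm_num)).mp (lt_of_le_of_lt h2a hnk)
    have hb : b < k := by
      have h5b : 5 ^ b ≤ factor.toNat :=
        Nat.le_of_dvd hpos ⟨2 ^ a, by rw [hfacN]; ring⟩
      have h25 : (2:ℕ) ^ b ≤ 5 ^ b := Nat.pow_le_pow_left (by norm_num) b
      exact (Nat.pow_lt_pow_iff_right (by norm_num)).mp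
        (lt_of_le_of_lt (le_trans h25 h5b) hnk)
    have hdvdN : factor.toNat ∣ 10 ^ k := by
      rw [hfacN, show (10:ℕ) = 2 * 5 from rfl, mul_pow]
      exact mul_dvd_mul (pow_dvd_pow 2 ha.le) (pow_dvd_pow 5 hb.le)
    have := Int.natCast_dvd_natCast.mpr hdvdN
    push_cast at this
    rwa [hcastf] at this
  · intro hdvd
    have hrdvd : r ∣ factor := Dvd.intro_left (2 ^ a * 5 ^ b) (by rw [hma, hrb]; ring)
    have hr2 : ¬ (2:Int) ∣ r := fun h => hm2 (hrb ▸ Dvd.dvd.mul_left h _)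
    have hr10 : r ∣ 10 ^ k := hrdvd.trans hdvd
    -- move to ℕ: r.toNat is coprime to 2 and 5 yet divides 10^k = 2^k * 5^k, so it is 1
    have hrabs : r.natAbs = r.toNat := by omega
    have hc2 : Nat.Coprime r.toNat 2 := by
      rw [Nat.coprime_comm]
      refine (Nat.Prime.coprime_iff_not_dvd Nat.prime_two).mpr fun h => hr2 ?_
      have := Int.natAbs_dvd_natAbs.mp (by simpa [hrabs] using h : (2:Int).natAbs ∣ r.natAbs)
      exact this
    have hc5 : Nat.Coprime r.toNat 5 := by
      rw [Nat.coprime_comm]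
      refine (Nat.Prime.coprime_iff_not_dvd (by norm_num)).mpr fun h => hr5 ?_
      have := Int.natAbs_dvd_natAbs.mp (by simpa [hrabs] using h : (5:Int).natAbs ∣ r.natAbs)
      exact this
    have hdN : r.toNat ∣ 10 ^ k := by
      have := Int.natAbs_dvd_natAbs.mpr hr10
      rwa [hrabs, show ((10:Int) ^ k).natAbs = 10 ^ k by
        rw [Int.natAbs_pow]; rfl] at this
    have h10 : Nat.Coprime r.toNat (10 ^ k) := by
      rw [show (10:ℕ) = 2 * 5 from rfl, mul_pow]
      exact Nat.Coprime.mul_right (hc2.pow_right k) (hc5.pow_right k)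
    have : r.toNat = 1 := h10.eq_one_of_dvd hdN
    omega

-- ===== VERDICT (by name: the statement is the Claim_ definition above) =====
theorem is_supported_factor_py_spec : Claim_equal_is_supported_factor_py := by
  intro factor _
  unfold Spec_is_supported_factor_py is_supported_factor_py is_supported_factor_py_alt
  by_cases hlt : factor < 1
  · simp [hlt]
  · simp only [if_neg hlt, decide_eq_decide]
    rw [PySem.Int.mod_eq_zero_iff_dvd]
    exact pvStrip_eq_one_iff factor (by omega)
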